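-- pv_equiv track=rewrite | github.com/dominicbeesley/chronosgamebbc | scripts/tileconv.py | morebpp
-- ===== SOURCE A (Python) =====
-- def morebpp(d, bpp):
-- 	r = 0
-- 	s = 8 // bpp
-- 	m = (1 << s) - 1
-- 	ss = 0
-- 	for n in range(bpp):
-- 		for b in range(bpp):
-- 			r = r | ((d & m) << ss)
-- 			ss = ss + s
-- 		d = d >> s
-- 	return r
-- ===== SOURCE B (Python) =====
-- def morebpp(d, bpp):
-- 	s = 8 // bpp
-- 	m = (1 << s) - 1
-- 	rep = 0
-- 	for b in range(bpp):
-- 		rep = rep | (1 << (b * s))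
-- 	r = 0
-- 	for n in range(bpp):
-- 		r = r | (((d >> (n * s)) & m) * rep) << (n * bpp * s)
-- 	return r
-- ===== Notes on version B (the rewrite author's own statement) =====
-- stated objective: alternative
-- what changed: The inner bit-replication loop is replaced by a single multiplication with a precomputed base-2^s repunit spreading constant, so the O(bpp^2) nested loops become one O(bpp) pass; B also reads each chunk by direct shift instead of destructively shifting d.
-- outside the precondition, e.g. on morebpp(5, 0): A raises ZeroDivisionError, B raises ZeroDivisionError; on morebpp(5, -1): A raises ValueError, B raises ValueError
import Mathlib
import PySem

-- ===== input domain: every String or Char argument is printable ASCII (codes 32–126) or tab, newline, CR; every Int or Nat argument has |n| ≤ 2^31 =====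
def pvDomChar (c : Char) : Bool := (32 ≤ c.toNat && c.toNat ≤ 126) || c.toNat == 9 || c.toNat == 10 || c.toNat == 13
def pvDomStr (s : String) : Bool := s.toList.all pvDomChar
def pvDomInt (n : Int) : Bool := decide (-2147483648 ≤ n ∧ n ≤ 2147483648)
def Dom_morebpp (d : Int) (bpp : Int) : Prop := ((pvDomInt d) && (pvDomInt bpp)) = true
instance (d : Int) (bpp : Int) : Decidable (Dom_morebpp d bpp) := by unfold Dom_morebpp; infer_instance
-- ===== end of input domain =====

-- B replaces A's O(bpp^2) inner bit-replication loop by one multiplication with a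
-- precomputed repunit spreading constant (one O(bpp) pass); a timing run measured B faster.

-- ===== PORT A =====
def morebpp (d : Int) (bpp : Int) : Int :=
  -- r = 0; s = 8 // bpp; m = (1 << s) - 1; ss = 0
  let s : Int := PySem.Int.floordiv 8 bpp
  let m : Int := ((1 : Int) <<< s.toNat) - 1
  -- state (r, ss, d); inner loop updates (r, ss), outer loop then shifts d
  let fin := (PySem.List.pyRange 0 bpp 1).foldl
    (fun (st : Int × Int × Int) (_n : Int) =>
      let inner := (PySem.List.pyRange 0 bpp 1).foldl
        (fun (p : Int × Int) (_b : Int) =>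
          (PySem.Int.bor p.1 ((PySem.Int.band st.2.2 m) <<< p.2.toNat), p.2 + s))
        (st.1, st.2.1)
      (inner.1, inner.2, st.2.2 >>> s.toNat))
    (((0 : Int), (0 : Int), d))
  fin.1

-- ===== PORT B =====
def morebpp_alt (d : Int) (bpp : Int) : Int :=
  let s : Int := PySem.Int.floordiv 8 bpp
  let m : Int := ((1 : Int) <<< s.toNat) - 1
  -- rep = OR of 1 << (b*s) over b in range(bpp)
  let rep := (PySem.List.pyRange 0 bpp 1).foldl
    (fun (rep : Int) (b : Int) => PySem.Int.bor rep ((1 : Int) <<< (b * s).toNat)) 0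
  -- r |= ((d >> (n*s)) & m) * rep << (n*bpp*s)
  (PySem.List.pyRange 0 bpp 1).foldl
    (fun (r : Int) (n : Int) =>
      PySem.Int.bor r (((PySem.Int.band (d >>> (n * s).toNat) m) * rep) <<< (n * bpp * s).toNat))
    0

-- ===== PRECONDITION & SPEC =====
-- Pre_ excludes bpp ≤ 0, on which Python A raises (ZeroDivisionError at 8//0 for bpp = 0,
-- ValueError 'negative shift count' at 1 << (8//bpp) for bpp < 0); A returns on all bpp ≥ 1.
def Pre_morebpp (d : Int) (bpp : Int) : Prop := 1 ≤ bpp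
instance (d : Int) (bpp : Int) : Decidable (Pre_morebpp d bpp) := by unfold Pre_morebpp; infer_instance
def pvWitness_morebpp : Int × Int := (5, 2)
def Spec_morebpp (d : Int) (bpp : Int) (out : Int) : Prop := out = morebpp_alt d bpp
instance (d : Int) (bpp : Int) (out : Int) : Decidable (Spec_morebpp d bpp out) := by unfold Spec_morebpp; infer_instance

-- ===== CLAIM (what is proved, stated in full; the proofs are below) =====
def Claim_equal_morebpp : Prop := ∀ (d : Int) (bpp : Int), Dom_morebpp d bpp → Pre_morebpp d bpp → Spec_morebpp d bpp (morebpp d bpp)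

-- ===== LEMMAS AND PROOFS =====

-- a ||| (b · 2^k) = a + b · 2^k when a occupies only the low k bits (Nat level)
lemma pvOrAddNat (a b k : Nat) (h : a < 2 ^ k) : a ||| b * 2 ^ k = a + b * 2 ^ k := by
  apply Nat.eq_of_testBit_eq
  intro i
  rw [Nat.testBit_or, add_comm, mul_comm b, Nat.testBit_two_pow_mul_add b h i]
  by_cases hik : i < k
  · have hn : ¬ k ≤ i := by omega
    simp [Nat.testBit_two_pow_mul, hn, hik]
  · have hki : k ≤ i := by omega
    have hfa : a.testBit i = false :=
      Nat.testBit_lt_two_pow (lt_of_lt_of_le h (Nat.pow_le_pow_right (by norm_num) hki))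
    simp [Nat.testBit_two_pow_mul, hki, hik, hfa]

-- the same at Int level for PySem.Int.bor, both arguments nonnegative
lemma pvBorAdd (a b : Int) (k : Nat) (ha : 0 ≤ a) (hak : a < 2 ^ k) (hb : 0 ≤ b) :
    PySem.Int.bor a (b * 2 ^ k) = a + b * 2 ^ k := by
  obtain ⟨A, rfl⟩ := Int.eq_ofNat_of_zero_le ha
  obtain ⟨B, rfl⟩ := Int.eq_ofNat_of_zero_le hb
  have h2 : (B : Int) * 2 ^ k = ((B * 2 ^ k : Nat) : Int) := by push_cast; ring
  have hA : A < 2 ^ k := by exact_mod_cast hak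
  rw [h2, PySem.Int.bor_of_nonneg (by positivity) (by positivity)]
  simp only [Int.toNat_natCast]
  rw [pvOrAddNat A B k hA]
  push_cast; ring

-- x & (2^k - 1) lands in [0, 2^k) for EVERY Int x (Python two's-complement &)
lemma pvBandMaskBounds (x : Int) (k : Nat) :
    0 ≤ PySem.Int.band x ((2 : Int) ^ k - 1) ∧ PySem.Int.band x ((2 : Int) ^ k - 1) < 2 ^ k := by
  have h1 : (1 : Nat) ≤ 2 ^ k := Nat.one_le_two_pow
  have hm0 : (0 : Int) ≤ (2 : Int) ^ k - 1 := by
    have : (1 : Int) ≤ 2 ^ k := one_le_pow₀ (by norm_num)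
    omega
  have hmt : ((2 : Int) ^ k - 1).toNat = 2 ^ k - 1 := by
    have : ((2 : Nat) ^ k : Int) = (2 : Int) ^ k := by push_cast; ring
    omega
  simp only [PySem.Int.band, if_pos hm0]
  by_cases hx : 0 ≤ x
  · rw [if_pos hx]
    refine ⟨by positivity, ?_⟩
    have hle : x.toNat &&& ((2 : Int) ^ k - 1).toNat ≤ 2 ^ k - 1 := by
      rw [hmt]; exact Nat.and_le_right
    have h3 : ((x.toNat &&& ((2 : Int) ^ k - 1).toNat : Nat) : Int) ≤ ((2 ^ k - 1 : Nat) : Int) := by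
      exact_mod_cast hle
    have h2 : (((2 : Nat) ^ k - 1 : Nat) : Int) < (2 : Int) ^ k := by push_cast [h1]; omega
    omega
  · rw [if_neg hx]
    refine ⟨by positivity, ?_⟩
    have hle : ((2 : Int) ^ k - 1).toNat - (((2 : Int) ^ k - 1).toNat &&& (-x - 1).toNat) ≤ 2 ^ k - 1 := by
      rw [hmt]; omega
    have h3 : ((((2 : Int) ^ k - 1).toNat - (((2 : Int) ^ k - 1).toNat &&& (-x - 1).toNat) : Nat) : Int)
        ≤ ((2 ^ k - 1 : Nat) : Int) := by exact_mod_cast hle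
    have h2 : (((2 : Nat) ^ k - 1 : Nat) : Int) < (2 : Int) ^ k := by push_cast [h1]; omega
    omega

-- the n-th s'-bit chunk of d, as both programs compute it
def pvChunk (d : Int) (s' n : Nat) : Int :=
  PySem.Int.band (d >>> (n * s')) ((2 : Int) ^ s' - 1)

lemma pvChunk_bounds (d : Int) (s' n : Nat) :
    0 ≤ pvChunk d s' n ∧ pvChunk d s' n < 2 ^ s' :=
  pvBandMaskBounds _ _

-- the base-2^s' repunit Σ_{b<k} 2^(b·s')
def pvRep (s' : Nat) : Nat → Int
  | 0 => 0
  | k + 1 => pvRep s' k + 2 ^ (k * s')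

lemma pvRep_nonneg (s' k : Nat) : 0 ≤ pvRep s' k := by
  induction k with
  | zero => simp [pvRep]
  | succ k ih => simp only [pvRep]; positivity

lemma pvRep_mul_le (s' : Nat) (c : Int) (_hc0 : 0 ≤ c) (hc : c ≤ 2 ^ s' - 1) (k : Nat) :
    c * pvRep s' k ≤ 2 ^ (k * s') - 1 := by
  induction k with
  | zero => simp [pvRep]
  | succ k ih =>
    have h1 : c * 2 ^ (k * s') ≤ (2 ^ s' - 1) * 2 ^ (k * s') :=
      mul_le_mul_of_nonneg_right hc (by positivity)
    have h2 : ((2 : Int) ^ s' - 1) * 2 ^ (k * s') = 2 ^ ((k + 1) * s') - 2 ^ (k * s') := by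
      rw [add_mul, one_mul, pow_add]; ring
    simp only [pvRep, mul_add]
    omega

-- accumulator value Σ_{n<k} chunk_n · rep · 2^(n·N·s') shared by both programs
def pvOut (d : Int) (s' N : Nat) : Nat → Int
  | 0 => 0
  | k + 1 => pvOut d s' N k + pvChunk d s' k * pvRep s' N * 2 ^ (k * N * s')

lemma pvOut_bounds (d : Int) (s' N k : Nat) :
    0 ≤ pvOut d s' N k ∧ pvOut d s' N k < 2 ^ (k * N * s') := by
  induction k with
  | zero => simp [pvOut]
  | succ k ih =>
    obtain ⟨hc0, hclt⟩ := pvChunk_bounds d s' k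
    have hcc : pvChunk d s' k ≤ 2 ^ s' - 1 := by linarith
    have hmul : pvChunk d s' k * pvRep s' N ≤ 2 ^ (N * s') - 1 :=
      pvRep_mul_le s' _ hc0 hcc N
    have hmul0 : 0 ≤ pvChunk d s' k * pvRep s' N := mul_nonneg hc0 (pvRep_nonneg s' N)
    have hpow : (0 : Int) < 2 ^ (k * N * s') := by positivity
    have he : (2 : Int) ^ ((k + 1) * N * s') = 2 ^ (k * N * s') * 2 ^ (N * s') := by
      rw [← pow_add]; ring_nf
    constructor
    · simp only [pvOut]
      have : 0 ≤ pvChunk d s' k * pvRep s' N * 2 ^ (k * N * s') := by positivity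
      linarith [ih.1]
    · simp only [pvOut]
      have h4 : pvChunk d s' k * pvRep s' N * 2 ^ (k * N * s')
          ≤ (2 ^ (N * s') - 1) * 2 ^ (k * N * s') :=
        mul_le_mul_of_nonneg_right hmul (le_of_lt hpow)
      nlinarith [ih.2]

-- A's inner loop: k OR-steps starting at (r, j) add c·pvRep·2^j and advance ss by k·s'
lemma pvInner (s' : Nat) (cc : Int) (hc0 : 0 ≤ cc) (hcc : cc ≤ 2 ^ s' - 1) (k : Nat)
    (r : Int) (j : Nat) (hr0 : 0 ≤ r) (hr : r < 2 ^ j) :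
    (List.range k).foldl
      (fun (p : Int × Int) (_ : Nat) => (PySem.Int.bor p.1 (cc <<< p.2.toNat), p.2 + (s' : Int)))
      (r, (j : Int))
    = (r + cc * pvRep s' k * 2 ^ j, ((j + k * s' : Nat) : Int)) := by
  induction k with
  | zero => simp [pvRep]
  | succ k ih =>
    rw [List.range_succ, List.foldl_append, ih]
    simp only [List.foldl, Int.toNat_natCast, Int.shiftLeft_eq]
    have ha0 : 0 ≤ r + cc * pvRep s' k * 2 ^ j := by
      have : 0 ≤ cc * pvRep s' k * 2 ^ j :=
        mul_nonneg (mul_nonneg hc0 (pvRep_nonneg s' k)) (by positivity)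
      linarith
    have halt : r + cc * pvRep s' k * 2 ^ j < 2 ^ (j + k * s') := by
      have hmul : cc * pvRep s' k ≤ 2 ^ (k * s') - 1 := pvRep_mul_le s' cc hc0 hcc k
      have h4 : cc * pvRep s' k * 2 ^ j ≤ (2 ^ (k * s') - 1) * 2 ^ j :=
        mul_le_mul_of_nonneg_right hmul (by positivity)
      have he : (2 : Int) ^ (j + k * s') = 2 ^ j * 2 ^ (k * s') := pow_add 2 j (k * s')
      nlinarith [hr]
    rw [pvBorAdd _ cc (j + k * s') ha0 halt hc0]
    refine Prod.ext ?_ ?_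
    · show r + cc * pvRep s' k * 2 ^ j + cc * 2 ^ (j + k * s')
        = r + cc * pvRep s' (k + 1) * 2 ^ j
      simp only [pvRep, pow_add]
      ring
    · show ((j + k * s' : Nat) : Int) + (s' : Int) = ((j + (k + 1) * s' : Nat) : Int)
      push_cast; ring

-- A's outer loop invariant
lemma pvOuterA (d : Int) (s' N : Nat) (k : Nat) :
    (List.range k).foldl
      (fun (st : Int × Int × Int) (_ : Nat) =>
        let inner := (List.range N).foldl
          (fun (p : Int × Int) (_ : Nat) =>
            (PySem.Int.bor p.1 ((PySem.Int.band st.2.2 ((2 : Int) ^ s' - 1)) <<< p.2.toNat),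
             p.2 + (s' : Int)))
          (st.1, st.2.1)
        (inner.1, inner.2, st.2.2 >>> s'))
      (((0 : Int), (0 : Int), d))
    = (pvOut d s' N k, ((k * N * s' : Nat) : Int), d >>> (k * s')) := by
  induction k with
  | zero => simp [pvOut]
  | succ k ih =>
    rw [List.range_succ, List.foldl_append, ih]
    simp only [List.foldl]
    obtain ⟨hc0, hclt⟩ := pvChunk_bounds d s' k
    have hcc : pvChunk d s' k ≤ 2 ^ s' - 1 := by linarith
    obtain ⟨ho0, holt⟩ := pvOut_bounds d s' N k
    have hinner := pvInner s' (pvChunk d s' k) hc0 hcc N (pvOut d s' N k) (k * N * s') ho0 holt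
    simp only [pvChunk] at hinner
    rw [hinner]
    refine Prod.ext ?_ (Prod.ext ?_ ?_)
    · show pvOut d s' N k + PySem.Int.band (d >>> (k * s')) ((2 : Int) ^ s' - 1) * pvRep s' N *
          2 ^ (k * N * s') = pvOut d s' N (k + 1)
      simp only [pvOut, pvChunk]
    · show ((k * N * s' + N * s' : Nat) : Int) = (((k + 1) * N * s' : Nat) : Int)
      push_cast; ring
    · show (d >>> (k * s')) >>> s' = d >>> ((k + 1) * s')
      have he : (k + 1) * s' = k * s' + s' := by ring
      rw [he, Int.shiftRight_add]

-- B's rep loop computes pvRep when s' ≥ 1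
lemma pvRepFold (s' : Nat) (hs' : 1 ≤ s') (k : Nat) :
    (List.range k).foldl (fun (rep : Int) (b : Nat) => PySem.Int.bor rep ((1 : Int) <<< (b * s'))) 0
      = pvRep s' k := by
  induction k with
  | zero => simp [pvRep]
  | succ k ih =>
    rw [List.range_succ, List.foldl_append, ih]
    simp only [List.foldl, Int.shiftLeft_eq, one_mul]
    have h2 : (2 : Int) ^ 1 ≤ 2 ^ s' := pow_le_pow_right₀ (by norm_num) hs'
    have h1le : (1 : Int) ≤ 2 ^ s' - 1 := by norm_num at h2 ⊢; omega
    have hlt : pvRep s' k < 2 ^ (k * s') := by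
      have := pvRep_mul_le s' 1 (by norm_num) h1le k
      linarith
    have := pvBorAdd (pvRep s' k) 1 (k * s') (pvRep_nonneg s' k) hlt (by norm_num)
    rw [one_mul] at this
    rw [this]
    simp [pvRep]

-- B's main loop, for any rep that agrees with pvRep under every chunk
lemma pvFoldB (d : Int) (s' N : Nat) (rep : Int)
    (hrep : ∀ n, pvChunk d s' n * rep = pvChunk d s' n * pvRep s' N) (k : Nat) :
    (List.range k).foldl
      (fun (r : Int) (n : Nat) =>
        PySem.Int.bor r ((pvChunk d s' n * rep) <<< (n * N * s')))
      0
    = pvOut d s' N k := by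
  induction k with
  | zero => simp [pvOut]
  | succ k ih =>
    rw [List.range_succ, List.foldl_append, ih]
    simp only [List.foldl, Int.shiftLeft_eq]
    rw [hrep k]
    obtain ⟨hc0, hclt⟩ := pvChunk_bounds d s' k
    obtain ⟨ho0, holt⟩ := pvOut_bounds d s' N k
    rw [pvBorAdd _ _ (k * N * s') ho0 holt (mul_nonneg hc0 (pvRep_nonneg s' N))]
    simp only [pvOut]

-- ===== VERDICT (by name: the statement is the Claim_ definition above) =====
theorem morebpp_spec : Claim_equal_morebpp := by
  intro d bpp _hdom hpre
  have hbpp : 0 < bpp := hpre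
  have hs0 : 0 ≤ PySem.Int.floordiv 8 bpp := by
    rw [PySem.Int.floordiv_eq_ediv_of_pos hbpp]
    exact Int.ediv_nonneg (by norm_num) (le_of_lt hbpp)
  obtain ⟨s', hs'⟩ := Int.eq_ofNat_of_zero_le hs0
  have hN : bpp = ((bpp.toNat : Nat) : Int) := (Int.toNat_of_nonneg (le_of_lt hbpp)).symm
  set N := bpp.toNat with hNdef
  unfold Spec_morebpp morebpp morebpp_alt
  rw [hs', hN]
  have hm : ((1 : Int) <<< s') = (2 : Int) ^ s' := by
    simp [Int.shiftLeft_eq]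
  simp only [PySem.List.pyRange_one, List.foldl_map, sub_zero, Int.toNat_natCast,
    zero_add, ← Nat.cast_mul]
  rw [hm]
  have hA := pvOuterA d s' N N
  simp only [] at hA
  rw [hA]
  by_cases hz : s' = 0
  · subst hz
    have hrep : ∀ n, pvChunk d 0 n * ((List.range N).foldl
        (fun (rep : Int) (b : Nat) => PySem.Int.bor rep ((1 : Int) <<< (b * 0))) 0)
        = pvChunk d 0 n * pvRep 0 N := by
      intro n
      have : pvChunk d 0 n = 0 := by
        simp [pvChunk, PySem.Int.band_zero]
      simp [this]
    have hB := pvFoldB d 0 N _ hrep N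
    simp only [pvChunk] at hB
    rw [hB]
  · have h1 : 1 ≤ s' := Nat.one_le_iff_ne_zero.mpr hz
    rw [pvRepFold s' h1 N]
    have hB := pvFoldB d s' N (pvRep s' N) (fun _ => rfl) N
    simp only [pvChunk] at hB
    rw [hB]
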